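-- pv_equiv track=rewrite | github.com/GLCN1234/KEDM | kedm_calculator/backend/solvers.py | _kedm_order_rows
-- ===== SOURCE A (Python) =====
-- def _kedm_order_rows(A, b, elim_col):
--     m = len(b)
--     nz = [r for r in range(m) if A[r][elim_col] != 0]
--     z  = [r for r in range(m) if A[r][elim_col] == 0]
--     order = []
--     i, j = 0, 0
--     for _ in range(m):
--         if i < len(nz): order.append(nz[i]); i += 1
--         elif j < len(z): order.append(z[j]);  j += 1
--     return [A[r] for r in order], [b[r] for r in order]
-- ===== SOURCE B (Python) =====
-- def _kedm_order_rows(A, b, elim_col):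
--     order = sorted(range(len(b)), key=lambda r: A[r][elim_col] == 0)
--     return [A[r] for r in order], [b[r] for r in order]
-- ===== Notes on version B (the rewrite author's own statement) =====
-- stated objective: idiomatic
-- what changed: Replaces A's two index comprehensions plus hand-written two-counter merge loop by one stable sort of the row indices on the boolean key A[r][elim_col] == 0 (False < True keeps nonzero-pivot rows first, stability keeps original order).
import Mathlib
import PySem

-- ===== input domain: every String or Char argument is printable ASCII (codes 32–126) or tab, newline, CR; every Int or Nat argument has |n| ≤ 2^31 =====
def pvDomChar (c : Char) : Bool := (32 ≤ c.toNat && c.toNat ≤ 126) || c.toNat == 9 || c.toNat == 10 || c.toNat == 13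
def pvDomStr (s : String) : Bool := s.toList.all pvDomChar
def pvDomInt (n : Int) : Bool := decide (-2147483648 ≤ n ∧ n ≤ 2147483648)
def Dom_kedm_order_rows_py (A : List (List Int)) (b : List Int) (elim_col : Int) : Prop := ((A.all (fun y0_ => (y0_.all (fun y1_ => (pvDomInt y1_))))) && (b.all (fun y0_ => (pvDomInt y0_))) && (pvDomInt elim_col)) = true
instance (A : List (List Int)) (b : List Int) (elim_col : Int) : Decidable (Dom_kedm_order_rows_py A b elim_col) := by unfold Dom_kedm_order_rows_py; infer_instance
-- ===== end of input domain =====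

-- B replaces A's index comprehensions and hand-written two-counter merge loop by one stable
-- sort of the row indices keyed on the boolean A[r][elim_col] == 0 (objective: idiomatic).

-- ===== PORT A =====
def kedm_order_rows_py (A : List (List Int)) (b : List Int) (elim_col : Int) : List (List Int) × List Int :=
  let m := b.length
  let nz := (PySem.List.pyRange 0 (m : Int) 1).filter
      (fun r => !(PySem.List.pyGetD (PySem.List.pyGetD A r []) elim_col 0 == 0))
  let z := (PySem.List.pyRange 0 (m : Int) 1).filter
      (fun r => PySem.List.pyGetD (PySem.List.pyGetD A r []) elim_col 0 == 0)
  let st := (List.range m).foldl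
      (fun (s : List Int × Nat × Nat) _ =>
        if s.2.1 < nz.length then (s.1 ++ [PySem.List.pyGetD nz (s.2.1 : Int) 0], s.2.1 + 1, s.2.2)
        else if s.2.2 < z.length then (s.1 ++ [PySem.List.pyGetD z (s.2.2 : Int) 0], s.2.1, s.2.2 + 1)
        else s)
      ([], 0, 0)
  (st.1.map (fun r => PySem.List.pyGetD A r []), st.1.map (fun r => PySem.List.pyGetD b r 0))

-- ===== PORT B =====
-- Python's bool key (False < True) is ported as the Int key 0 < 1 — exact for sorting.
def kedm_order_rows_py_alt (A : List (List Int)) (b : List Int) (elim_col : Int) : List (List Int) × List Int :=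
  let order := PySem.List.sorted (PySem.List.pyRange 0 (b.length : Int) 1)
      (fun r => if PySem.List.pyGetD (PySem.List.pyGetD A r []) elim_col 0 == 0 then (1 : Int) else 0)
  (order.map (fun r => PySem.List.pyGetD A r []), order.map (fun r => PySem.List.pyGetD b r 0))

-- ===== PRECONDITION & SPEC =====
-- Pre_ excludes exactly the inputs where Python A raises IndexError: fewer rows in A than entries
-- in b, or elim_col out of (negative-wrapping) range for one of the first len(b) rows.
def Pre_kedm_order_rows_py (A : List (List Int)) (b : List Int) (elim_col : Int) : Prop :=
  (decide (b.length ≤ A.length) &&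
   (A.take b.length).all (fun row =>
     decide (-(row.length : Int) ≤ elim_col) && decide (elim_col < (row.length : Int)))) = true
instance (A : List (List Int)) (b : List Int) (elim_col : Int) : Decidable (Pre_kedm_order_rows_py A b elim_col) := by unfold Pre_kedm_order_rows_py; infer_instance

def pvWitness_kedm_order_rows_py : List (List Int) × List Int × Int :=
  ([[1, 2], [0, 3], [4, 5]], [7, 8, 9], 0)

def Spec_kedm_order_rows_py (A : List (List Int)) (b : List Int) (elim_col : Int) (out : List (List Int) × List Int) : Prop := out = kedm_order_rows_py_alt A b elim_col
instance (A : List (List Int)) (b : List Int) (elim_col : Int) (out : List (List Int) × List Int) : Decidable (Spec_kedm_order_rows_py A b elim_col out) := by unfold Spec_kedm_order_rows_py; infer_instance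

-- ===== CLAIM (what is proved, stated in full; the proofs are below) =====
def Claim_equal_kedm_order_rows_py : Prop := ∀ (A : List (List Int)) (b : List Int) (elim_col : Int), Dom_kedm_order_rows_py A b elim_col → Pre_kedm_order_rows_py A b elim_col → Spec_kedm_order_rows_py A b elim_col (kedm_order_rows_py A b elim_col)

-- ===== LEMMAS AND PROOFS =====

-- insertBy places x after a prefix it is not before and in front of a suffix it is before.
theorem insertBy_middle {α : Type} (before : α → α → Bool) (x : α) :
    ∀ (f g : List α), (∀ y ∈ f, before x y = false) → (∀ y ∈ g, before x y = true) →
      PySem.List.insertBy before x (f ++ g) = f ++ x :: g := by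
  intro f
  induction f with
  | nil =>
      intro g _ hg
      cases g with
      | nil => simp [PySem.List.insertBy]
      | cons y ys => simp [PySem.List.insertBy, hg y (by simp)]
  | cons z f' ih =>
      intro g hf hg
      simp only [List.cons_append, PySem.List.insertBy, hf z (by simp)]
      simp [ih g (fun y hy => hf y (by simp [hy])) hg]

-- Stable sort on the 0/1 key (if q x then 1 else 0) is exactly: q-false elements first
-- (in order), then q-true elements (in order).
theorem sorted01_fold {α : Type} (q : α → Bool) :
    ∀ (xs f g : List α), (∀ y ∈ f, q y = false) → (∀ y ∈ g, q y = true) →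
      xs.foldl (fun acc x =>
          PySem.List.insertBy (fun a b =>
            decide ((if q a then (1 : Int) else 0) < (if q b then (1 : Int) else 0))) x acc)
        (f ++ g)
      = (f ++ xs.filter (fun x => !(q x))) ++ (g ++ xs.filter q) := by
  intro xs
  induction xs with
  | nil => intro f g _ _; simp
  | cons x xs ih =>
      intro f g hf hg
      by_cases hx : q x = true
      · have hg' : ∀ y ∈ g ++ [x], q y = true := by
          intro y hy
          rcases List.mem_append.mp hy with h | h
          · exact hg y h
          · simp at h; simp [h, hx]
        have hins : PySem.List.insertBy (fun a b =>
            decide ((if q a then (1 : Int) else 0) < (if q b then (1 : Int) else 0))) x (f ++ g)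
            = f ++ (g ++ [x]) := by
          rw [show f ++ (g ++ [x]) = (f ++ g) ++ [x] by simp]
          apply PySem.List.insertBy_of_forall_not_before
          intro y hy
          by_cases hq : q y = true <;> simp [hx, hq]
        simp only [List.foldl_cons, hins]
        rw [ih f (g ++ [x]) hf hg']
        simp [hx, List.append_assoc]
      · have hx' : q x = false := by simpa using hx
        have hf' : ∀ y ∈ f ++ [x], q y = false := by
          intro y hy
          rcases List.mem_append.mp hy with h | h
          · exact hf y h
          · simp at h; simp [h, hx']
        have hins : PySem.List.insertBy (fun a b =>
            decide ((if q a then (1 : Int) else 0) < (if q b then (1 : Int) else 0))) x (f ++ g)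
            = (f ++ [x]) ++ g := by
          rw [show (f ++ [x]) ++ g = f ++ x :: g by simp]
          apply insertBy_middle
          · intro y hy; simp [hx', hf y hy]
          · intro y hy; simp [hx', hg y hy]
        simp only [List.foldl_cons, hins]
        rw [ih (f ++ [x]) g hf' hg]
        simp [hx', List.append_assoc]

theorem sorted01 {α : Type} (q : α → Bool) (xs : List α) :
    PySem.List.sorted xs (fun x => if q x then (1 : Int) else 0)
      = xs.filter (fun x => !(q x)) ++ xs.filter q := by
  rw [PySem.List.sorted_eq_foldl_insertBy]
  simpa using sorted01_fold q xs [] [] (by simp) (by simp)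

-- A's merge loop invariant after t iterations.
theorem merge_fold_aux (nz z : List Int) (t : Nat) (ht : t ≤ nz.length + z.length) :
    (List.range t).foldl
        (fun (s : List Int × Nat × Nat) _ =>
          if s.2.1 < nz.length then (s.1 ++ [PySem.List.pyGetD nz (s.2.1 : Int) 0], s.2.1 + 1, s.2.2)
          else if s.2.2 < z.length then (s.1 ++ [PySem.List.pyGetD z (s.2.2 : Int) 0], s.2.1, s.2.2 + 1)
          else s)
        ([], 0, 0)
      = (nz.take t ++ z.take (t - nz.length), min t nz.length, t - min t nz.length) := by
  induction t with
  | zero => simp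
  | succ t ih =>
      have ht' : t ≤ nz.length + z.length := by omega
      rw [List.range_succ, List.foldl_append, ih ht']
      by_cases h : t < nz.length
      · have hmin : min t nz.length = t := by omega
        have hmin' : min (t + 1) nz.length = t + 1 := by omega
        have hz : t - nz.length = 0 := by omega
        have hz' : t + 1 - nz.length = 0 := by omega
        simp only [List.foldl_cons, List.foldl_nil, hmin, hz, hz', hmin']
        simp only [if_pos h]
        have hv : PySem.List.pyGetD nz (t : Int) 0 = nz[t] := by
          simp [PySem.List.pyGetD_natCast, h]
        rw [hv, List.take_add_one, List.getElem?_eq_getElem h]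
        simp
      · have hmin : min t nz.length = nz.length := by omega
        have hmin' : min (t + 1) nz.length = nz.length := by omega
        have hj : t - nz.length < z.length := by omega
        simp only [List.foldl_cons, List.foldl_nil, hmin, hmin']
        simp only [if_neg (by omega : ¬ nz.length < nz.length), if_pos hj]
        have : PySem.List.pyGetD z ((t - nz.length : Nat) : Int) 0 = z[t - nz.length] := by
          simp [PySem.List.pyGetD_natCast, hj]
        rw [this]
        have htk : nz.take t = nz := List.take_of_length_le (by omega)
        have htk' : nz.take (t + 1) = nz := List.take_of_length_le (by omega)
        rw [htk, htk', (by omega : t + 1 - nz.length = t - nz.length + 1),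
          List.take_add_one, List.getElem?_eq_getElem hj]
        simp

-- complementary filters of the same list have total length
theorem filter_lengths {α : Type} (p : α → Bool) (xs : List α) :
    (xs.filter (fun x => !(p x))).length + (xs.filter p).length = xs.length := by
  induction xs with
  | nil => simp
  | cons x xs ih => by_cases h : p x = true <;> simp [h] <;> omega

theorem main_eq (A : List (List Int)) (b : List Int) (elim_col : Int) :
    kedm_order_rows_py A b elim_col = kedm_order_rows_py_alt A b elim_col := by
  unfold kedm_order_rows_py kedm_order_rows_py_alt
  simp only []
  set q : Int → Bool := fun r => PySem.List.pyGetD (PySem.List.pyGetD A r []) elim_col 0 == 0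
    with hq
  set nz := (PySem.List.pyRange 0 (b.length : Int) 1).filter (fun r => !(q r)) with hnz
  set z := (PySem.List.pyRange 0 (b.length : Int) 1).filter q with hz
  have hlen : nz.length + z.length = b.length := by
    have := filter_lengths q (PySem.List.pyRange 0 (b.length : Int) 1)
    rw [hnz, hz]
    simpa [PySem.List.pyRange_zero_natCast] using this
  rw [sorted01 q (PySem.List.pyRange 0 (b.length : Int) 1)]
  rw [merge_fold_aux nz z b.length (by omega)]
  have h1 : min b.length nz.length = nz.length := by omega
  rw [List.take_of_length_le (by omega : nz.length ≤ b.length),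
    (by omega : b.length - nz.length = z.length), List.take_length]

-- ===== VERDICT (by name: the statement is the Claim_ definition above) =====
theorem kedm_order_rows_py_spec : Claim_equal_kedm_order_rows_py := by
  intro A b elim_col _ _
  exact main_eq A b elim_col
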